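-- pv_equiv track=rewrite | github.com/JammalAdeyemi/Ppython | Hackerrank/Sky.py | solution
-- ===== SOURCE A (Python) =====
-- def solution(S):
--     # Initialize a count variable to keep track of the number of times the first and last characters are equal
--     count = 0
--
--     # Get the length of the input string
--     n = len(S)
--
--     # Iterate over each character in the string
--     for each in range(n):
--         # Check if the first and last characters of the string are equal
--         if S[0] == S[-1]:
--             # If they are equal, increment the count variable
--             count += 1
--
--         # Rotate the string by moving the first character to the end
--         S = S[1:] + S[0]
--     # Return the final count value
--     return count
-- ===== SOURCE B (Python) =====
-- def solution(S):
--     # one pass: pair each character with its cyclic predecessor and count matches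
--     return sum(1 for a, b in zip(S, S[-1:] + S[:-1]) if a == b)
-- ===== Notes on version B (the rewrite author's own statement) =====
-- stated objective: faster
-- what changed: Replaces the loop that rebuilds a rotated copy of the string on every iteration with a single pass comparing each character to its cyclic predecessor via zip.
import Mathlib
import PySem

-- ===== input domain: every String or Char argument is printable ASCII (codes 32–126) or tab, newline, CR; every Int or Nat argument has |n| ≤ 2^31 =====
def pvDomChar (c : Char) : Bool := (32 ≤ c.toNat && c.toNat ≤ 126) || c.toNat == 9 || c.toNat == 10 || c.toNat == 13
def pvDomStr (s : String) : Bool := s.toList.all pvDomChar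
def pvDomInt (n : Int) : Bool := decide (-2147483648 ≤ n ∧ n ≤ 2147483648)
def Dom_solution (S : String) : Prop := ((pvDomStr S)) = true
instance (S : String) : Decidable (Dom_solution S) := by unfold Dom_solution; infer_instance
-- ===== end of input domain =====

-- B replaces A's quadratic rotate-and-compare loop with one pass pairing each
-- character with its cyclic predecessor (objective: faster).

-- ===== PORT A =====
-- A rotates the string n times, each time comparing first and last characters.
-- S[0] concatenated at the end is ported as (pyGet? s 0).toList: inside the loop
-- s is nonempty, so this is exactly the one-character string S[0].
def solution (S : String) : Int :=
  let s0 := S.toList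
  let n : Int := (s0.length : Int)
  ((PySem.List.pyRange 0 n 1).foldl
    (fun (st : List Char × Int) (_ : Int) =>
      let count := if PySem.List.pyGet? st.1 0 = PySem.List.pyGet? st.1 (-1)
                   then st.2 + 1 else st.2
      (PySem.List.slice st.1 (some 1) none ++ (PySem.List.pyGet? st.1 0).toList, count))
    (s0, 0)).2

-- ===== PORT B =====
def solution_alt (S : String) : Int :=
  let s := S.toList
  let prev := PySem.List.slice s (some (-1)) none ++ PySem.List.slice s none (some (-1))
  (s.zip prev).foldl (fun c p => if p.1 = p.2 then c + 1 else c) 0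

-- ===== PRECONDITION & SPEC =====
def Spec_solution (S : String) (out : Int) : Prop := out = solution_alt S
instance (S : String) (out : Int) : Decidable (Spec_solution S out) := by unfold Spec_solution; infer_instance

-- ===== CLAIM (what is proved, stated in full; the proofs are below) =====
def Claim_equal_solution : Prop := ∀ (S : String), Dom_solution S → Spec_solution S (solution S)

-- ===== LEMMAS AND PROOFS =====

-- A's loop step and its iteration (the loop index is unused).
def pvStep (st : List Char × Int) : List Char × Int :=
  let count := if PySem.List.pyGet? st.1 0 = PySem.List.pyGet? st.1 (-1)
               then st.2 + 1 else st.2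
  (PySem.List.slice st.1 (some 1) none ++ (PySem.List.pyGet? st.1 0).toList, count)

def pvIter : Nat → (List Char × Int) → (List Char × Int)
  | 0, st => st
  | k + 1, st => pvIter k (pvStep st)

-- the list B zips with: each position's cyclic predecessor
def pvRotR (s : List Char) : List Char :=
  s.drop (s.length - 1) ++ s.dropLast

lemma pvFoldl_eq_iter (l : List Int) (st : List Char × Int) :
    l.foldl (fun st _ => pvStep st) st = pvIter l.length st := by
  induction l generalizing st with
  | nil => rfl
  | cons x xs ih => simp [List.foldl, pvIter, ih]

lemma pvCnt_fold (l : List (Char × Char)) (c : Int) :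
    l.foldl (fun c p => if p.1 = p.2 then c + 1 else c) c
      = c + (l.countP (fun p => p.1 == p.2) : Int) := by
  induction l generalizing c with
  | nil => simp
  | cons p ps ih =>
      simp only [List.foldl, List.countP_cons, ih]
      by_cases h : p.1 = p.2
      · simp [h]; ring
      · simp [h]

lemma pvDrop_pred (a : Char) (as : List Char) :
    (a :: as).drop as.length = [(a :: as).getLast (by simp)] := by
  induction as generalizing a with
  | nil => simp
  | cons b bs ih => simpa using ih b

lemma pvRotR_cons (a : Char) (as : List Char) :
    pvRotR (a :: as) = (a :: as).getLast (by simp) :: (a :: as).dropLast := by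
  unfold pvRotR
  simp [pvDrop_pred a as]

lemma pvRotR_concat (a : Char) (as : List Char) :
    pvRotR (as ++ [a]) = a :: as := by
  unfold pvRotR
  have h1 : (as ++ [a]).length - 1 = as.length := by simp
  rw [h1, List.drop_left, List.dropLast_concat]
  rfl

lemma pvStep_cons (a : Char) (as : List Char) (c : Int) :
    pvStep (a :: as, c)
      = (as ++ [a], if a = (a :: as).getLast (by simp) then c + 1 else c) := by
  have hl : (a :: as).getLast? = some ((a :: as).getLast (by simp)) :=
    List.getLast?_eq_some_getLast (h := by simp)
  unfold pvStep
  simp [PySem.List.slice_from_one, PySem.List.pyGet?_neg_one, hl]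

lemma pvIter_count (k : Nat) (s : List Char) (c : Int) (hk : k ≤ s.length) :
    (pvIter k (s, c)).2
      = c + (((s.zip (pvRotR s)).take k).countP (fun p => p.1 == p.2) : Int) := by
  induction k generalizing s c with
  | zero => simp [pvIter]
  | succ k ih =>
      match s with
      | [] => simp at hk
      | a :: as =>
        have hk' : k ≤ (as ++ [a]).length := by
          simp only [List.length_append, List.length_cons, List.length_nil] at hk ⊢
          omega
        rw [pvIter, pvStep_cons, ih _ _ hk']
        have hzip1 : (a :: as).zip (pvRotR (a :: as))
            = (a, (a :: as).getLast (by simp)) :: as.zip ((a :: as).dropLast) := by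
          rw [pvRotR_cons]; rfl
        have hsplit : a :: as = (a :: as).dropLast ++ [(a :: as).getLast (by simp)] :=
          (List.dropLast_append_getLast (by simp)).symm
        have hzip2 : (as ++ [a]).zip (pvRotR (as ++ [a]))
            = as.zip ((a :: as).dropLast) ++ [(a, (a :: as).getLast (by simp))] := by
          rw [pvRotR_concat]
          conv_lhs => rw [hsplit]
          rw [List.zip_append (by simpa using congrArg List.length hsplit)]
          rfl
        rw [hzip1, hzip2]
        have hlen : k ≤ (as.zip ((a :: as).dropLast)).length := by
          have h2 := hk
          simp only [List.length_zip, List.length_dropLast, List.length_cons] at h2 ⊢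
          omega
        rw [List.take_append_of_le_length hlen, List.take_succ_cons, List.countP_cons]
        simp only [beq_iff_eq]
        by_cases h : a = (a :: as).getLast (by simp)
        · rw [if_pos h, if_pos h]; push_cast; ring
        · rw [if_neg h, if_neg h]; push_cast; ring

lemma pvZip_len (s : List Char) : (s.zip (pvRotR s)).length = s.length := by
  cases s with
  | nil => simp [pvRotR]
  | cons a as => rw [pvRotR_cons]; simp [List.length_zip, List.length_dropLast]

-- ===== VERDICT (by name: the statement is the Claim_ definition above) =====
theorem solution_spec : Claim_equal_solution := by
  intro S _
  unfold Spec_solution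
  show (List.foldl (fun (st : List Char × Int) (_ : Int) => pvStep st) (S.toList, (0 : Int))
        (PySem.List.pyRange 0 (S.toList.length : Int) 1)).2
     = List.foldl (fun c p => if p.1 = p.2 then c + 1 else c) (0 : Int)
        (S.toList.zip (PySem.List.slice S.toList (some (-1)) none
          ++ PySem.List.slice S.toList none (some (-1))))
  rw [pvFoldl_eq_iter, PySem.List.length_pyRange_one]
  have hn : (((S.toList.length : Int)) - 0).toNat = S.toList.length := by omega
  rw [hn, pvIter_count S.toList.length S.toList 0 le_rfl]
  rw [PySem.List.slice_from_neg_one, PySem.List.slice_to_neg_one]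
  rw [List.take_of_length_le (by rw [pvZip_len])]
  rw [pvCnt_fold]
  rfl
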